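-- pv_equiv track=rewrite | github.com/paultoster/hometools | python3/projects/tools/hfkt_str.py | get_index_no_quot
-- ===== SOURCE A (Python) =====
-- def get_index_no_quot(text, quot0, quot1):
--     """
--     Gibt Indexpaare (Tuples) in dem der Text nicht gequotet ist z.B.
--
--     text  = "abc {nest} efg  {plab}"
--     #        0123456789012345678901
--     quot0 = "{"
--     quot1 = "}"
--
--     a = get_index_quot(text,quot0,quot1)
--
--     a ergibt [(0,4),(10,16)]
--     """
--     liste = []
--
--     i0 = 0
--     i1 = len(text)
--     #   print "i1 = %i" % i1
--     lq0 = len(quot0)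
--     lq1 = len(quot1)
--
--     istart = 0
--
--     while istart < i1:
--
--         iend = text.find(quot0, istart, i1)
--         #       print "iend = %i" % iend
--         if iend == -1:
--             iend = i1
--
--         tup = (istart, iend)
--         if (istart != iend):
--             liste.append(tup)
--
--         i0 = text.find(quot1, iend + lq0, i1)
--
--         if i0 == -1:
--             istart = i1
--         else:
--             istart = i0 + lq1
--
--     return liste
-- ===== SOURCE B (Python) =====
-- def get_index_no_quot(text, quot0, quot1):
--     n = len(text)
--     lq0 = len(quot0)
--     lq1 = len(quot1)
--     res = []
--     i = 0
--     start = 0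
--     inside = False
--     while i < n:
--         if not inside:
--             if text[i:i + lq0] == quot0:
--                 if start != i:
--                     res.append((start, i))
--                 inside = True
--                 i += lq0
--             else:
--                 i += 1
--         else:
--             if text[i:i + lq1] == quot1:
--                 inside = False
--                 start = i + lq1
--                 i += lq1
--             else:
--                 i += 1
--     if not inside and start != n:
--         res.append((start, n))
--     return res
-- ===== Notes on version B (the rewrite author's own statement) =====
-- stated objective: alternative
-- what changed: Replaced the pair of alternating str.find calls per quoted block with a single left-to-right character scan that maintains an inside/outside flag and the start of the current outside span, comparing a slice against the delimiter at each position.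
import Mathlib
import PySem

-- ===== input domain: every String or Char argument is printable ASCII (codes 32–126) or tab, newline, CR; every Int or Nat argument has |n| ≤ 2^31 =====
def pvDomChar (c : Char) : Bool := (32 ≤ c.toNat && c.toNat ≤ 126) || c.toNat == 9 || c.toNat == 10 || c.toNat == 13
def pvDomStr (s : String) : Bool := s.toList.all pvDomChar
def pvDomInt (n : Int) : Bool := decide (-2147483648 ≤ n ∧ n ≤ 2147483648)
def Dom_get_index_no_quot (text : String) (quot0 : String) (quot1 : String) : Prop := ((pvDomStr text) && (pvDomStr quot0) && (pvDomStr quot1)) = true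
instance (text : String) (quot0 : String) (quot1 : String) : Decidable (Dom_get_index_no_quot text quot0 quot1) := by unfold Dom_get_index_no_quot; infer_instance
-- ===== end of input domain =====

-- B replaces A's alternating str.find jumps with a single left-to-right scan that keeps an
-- inside/outside flag and the start of the current outside span (objective: alternative
-- decomposition, same asymptotic cost).


-- ===== PORT A =====
-- A's while loop, transliterated step for step with a fuel parameter (fuel t.length + 2
-- exceeds the number of iterations on every input admitted by Pre_, where each iteration
-- strictly increases istart or ends the loop).  text.find(sub, istart, i1) with
-- i1 = len(text) is exactly PySem.Chars.findFrom … (some i1).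
def pvALoop (t q0 q1 : List Char) (istart : Int) (acc : List (Int × Int)) (fuel : Nat) :
    List (Int × Int) :=
  match fuel with
  | 0 => acc
  | f + 1 =>
    let i1 : Int := t.length
    if istart < i1 then
      let iend' := PySem.Chars.findFrom t q0 istart (some i1)
      let iend := if iend' = -1 then i1 else iend'
      let acc' := if istart ≠ iend then acc ++ [(istart, iend)] else acc
      let i0 := PySem.Chars.findFrom t q1 (iend + (q0.length : Int)) (some i1)
      pvALoop t q0 q1 (if i0 = -1 then i1 else i0 + (q1.length : Int)) acc' f
    else acc


def get_index_no_quot (text : String) (quot0 : String) (quot1 : String) : List (Int × Int) :=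
  pvALoop text.toList quot0.toList quot1.toList 0 [] (text.toList.length + 2)

-- ===== PORT B =====
-- B's while loop, transliterated step for step with a fuel parameter (fuel 3*t.length + 3
-- exceeds the number of iterations on every input admitted by Pre_).
-- text[i:i+len(q)] == q with 0 ≤ i is exactly (t.drop i).take q.length = q.
def pvBLoop (t q0 q1 : List Char) (inside : Bool) (i start : Nat) (acc : List (Int × Int))
    (fuel : Nat) : List (Int × Int) :=
  match fuel with
  | 0 => acc
  | f + 1 =>
    if i < t.length then
      if inside = false then
        if (t.drop i).take q0.length = q0 then
          pvBLoop t q0 q1 true (i + q0.length) start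
            (if start ≠ i then acc ++ [((start : Int), (i : Int))] else acc) f
        else pvBLoop t q0 q1 false (i + 1) start acc f
      else
        if (t.drop i).take q1.length = q1 then
          pvBLoop t q0 q1 false (i + q1.length) (i + q1.length) acc f
        else pvBLoop t q0 q1 true (i + 1) start acc f
    else
      if inside = false ∧ start ≠ t.length then acc ++ [((start : Int), (t.length : Int))]
      else acc


def get_index_no_quot_alt (text : String) (quot0 : String) (quot1 : String) :
    List (Int × Int) :=
  pvBLoop text.toList quot0.toList quot1.toList false 0 0 [] (3 * text.toList.length + 3)

-- ===== PRECONDITION & SPEC =====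
-- Pre_ excludes exactly the inputs (both delimiters empty and text nonempty) on which A's
-- while loop never terminates (istart never advances), so A returns no value there.
def Pre_get_index_no_quot (text : String) (quot0 : String) (quot1 : String) : Prop :=
  ¬ (quot0 = "" ∧ quot1 = "" ∧ text ≠ "")
instance (text : String) (quot0 : String) (quot1 : String) :
    Decidable (Pre_get_index_no_quot text quot0 quot1) := by
  unfold Pre_get_index_no_quot; infer_instance

def pvWitness_get_index_no_quot : String × String × String :=
  ("abc {nest} efg  {plab}", "{", "}")

def Spec_get_index_no_quot (text : String) (quot0 : String) (quot1 : String)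
    (out : List (Int × Int)) : Prop := out = get_index_no_quot_alt text quot0 quot1
instance (text : String) (quot0 : String) (quot1 : String) (out : List (Int × Int)) :
    Decidable (Spec_get_index_no_quot text quot0 quot1 out) := by
  unfold Spec_get_index_no_quot; infer_instance

-- ===== CLAIM (what is proved, stated in full; the proofs are below) =====
def Claim_equal_get_index_no_quot : Prop := ∀ (text : String) (quot0 : String) (quot1 : String), Dom_get_index_no_quot text quot0 quot1 → Pre_get_index_no_quot text quot0 quot1 → Spec_get_index_no_quot text quot0 quot1 (get_index_no_quot text quot0 quot1)

-- ===== LEMMAS AND PROOFS =====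

-- fuel measure for B's loop: every loop step strictly decreases it (under Pre_)
def pvBM (n : Nat) (q1 : List Char) (inside : Bool) (i : Nat) : Nat :=
  3 * (n - i) + (if inside then (if q1 = [] then 2 else 1) else (if q1 = [] then 1 else 2))


theorem pvFindFrom_some_len (s sub : List Char) (st : Int) :
    PySem.Chars.findFrom s sub st (some (s.length : Int)) = PySem.Chars.findFrom s sub st := by
  have h2 : ¬ ((s.length : Int) < 0) := not_lt.mpr (Int.natCast_nonneg _)
  simp [PySem.Chars.findFrom, h2]

theorem pvFindFrom_of_gt (s sub : List Char) (st : Int) (h : (s.length : Int) < st) :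
    PySem.Chars.findFrom s sub st = -1 := by
  have h2 : ¬ st < 0 := by omega
  simp [PySem.Chars.findFrom, h2, h]

theorem pvInfix_iff_exists_prefix (s sub : List Char) :
    sub <:+: s ↔ ∃ j, sub <+: s.drop j := by
  rw [← PySem.Chars.isIn_iff_infix, ← PySem.Chars.exists_prefix_drop_iff_isIn]

theorem pvFindFrom_self (s sub : List Char) (k : Nat) (hk : k ≤ s.length)
    (h : sub <+: s.drop k) : PySem.Chars.findFrom s sub (k : Int) = (k : Int) := by
  have hne : PySem.Chars.findFrom s sub (k : Int) ≠ -1 := by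
    intro hc
    rw [PySem.Chars.findFrom_natCast_eq_neg_one_iff s sub k hk] at hc
    exact hc h.isInfix
  obtain ⟨h1, h2, h3⟩ := PySem.Chars.findFrom_natCast_spec s sub k hk hne
  by_contra hcon
  have hlt : k < (PySem.Chars.findFrom s sub (k : Int)).toNat := by
    omega
  exact h3 k le_rfl hlt h

theorem pvFindFrom_succ (s sub : List Char) (k : Nat) (hk : k < s.length)
    (h : ¬ sub <+: s.drop k) :
    PySem.Chars.findFrom s sub (k : Int) = PySem.Chars.findFrom s sub ((k + 1 : Nat) : Int) := by
  have hk1 : k + 1 ≤ s.length := hk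
  have hinf : sub <:+: s.drop k ↔ sub <:+: s.drop (k+1) := by
    rw [pvInfix_iff_exists_prefix, pvInfix_iff_exists_prefix]
    constructor
    · rintro ⟨j, hj⟩
      rw [List.drop_drop] at hj
      rcases Nat.eq_zero_or_pos j with hj0 | hj0
      · subst hj0; simp at hj; exact absurd hj h
      · refine ⟨j - 1, ?_⟩
        rw [List.drop_drop, show k + 1 + (j - 1) = k + j from by omega]
        exact hj
    · rintro ⟨j, hj⟩
      rw [List.drop_drop] at hj
      refine ⟨j + 1, ?_⟩
      rw [List.drop_drop, show k + (j + 1) = k + 1 + j from by omega]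
      exact hj
  by_cases he : PySem.Chars.findFrom s sub ((k+1 : Nat) : Int) = -1
  · rw [he, PySem.Chars.findFrom_natCast_eq_neg_one_iff s sub k (le_of_lt hk)]
    rw [PySem.Chars.findFrom_natCast_eq_neg_one_iff s sub (k+1) hk1] at he
    rw [hinf]; exact he
  · have hne : PySem.Chars.findFrom s sub (k : Int) ≠ -1 := by
      intro hc
      rw [PySem.Chars.findFrom_natCast_eq_neg_one_iff s sub k (le_of_lt hk), hinf] at hc
      exact he ((PySem.Chars.findFrom_natCast_eq_neg_one_iff s sub (k+1) hk1).mpr hc)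
    obtain ⟨a1, a2, a3⟩ := PySem.Chars.findFrom_natCast_spec s sub k (le_of_lt hk) hne
    obtain ⟨b1, b2, b3⟩ := PySem.Chars.findFrom_natCast_spec s sub (k+1) hk1 he
    set r := PySem.Chars.findFrom s sub (k : Int) with hr
    set r' := PySem.Chars.findFrom s sub ((k+1 : Nat) : Int) with hr'
    have hrk : k + 1 ≤ r.toNat := by
      rcases Nat.lt_or_ge k r.toNat with hlt | hge
      · omega
      · exfalso
        have : r.toNat = k := by omega
        rw [this] at a2; exact h a2
    have h1 : ¬ r.toNat < r'.toNat := fun hc => b3 r.toNat hrk hc a2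
    have h2 : ¬ r'.toNat < r.toNat := fun hc => a3 r'.toNat (by push_cast at b1; omega) hc b2
    have : r.toNat = r'.toNat := by omega
    omega

theorem pvFind_fit (s sub : List Char) (k : Nat) (hk : k ≤ s.length)
    (h : PySem.Chars.findFrom s sub (k : Int) ≠ -1) :
    k ≤ (PySem.Chars.findFrom s sub (k : Int)).toNat ∧
    (PySem.Chars.findFrom s sub (k : Int)).toNat + sub.length ≤ s.length := by
  obtain ⟨h1, h2, _⟩ := PySem.Chars.findFrom_natCast_spec s sub k hk h
  have hle := PySem.Chars.find_le_length (s.drop k) sub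
  have hrw := PySem.Chars.findFrom_natCast s sub k hk
  rw [if_neg (by intro hc; rw [hrw, if_pos hc] at h; exact h rfl)] at hrw
  have hlen := h2.length_le
  simp [List.length_drop] at hlen hle
  constructor
  · omega
  · have : (PySem.Chars.findFrom s sub (k : Int)).toNat ≤ s.length := by
      have hf0 : (0:Int) ≤ PySem.Chars.find (s.drop k) sub := by
        by_contra hc
        have := PySem.Chars.neg_one_le_find (s.drop k) sub
        have : PySem.Chars.find (s.drop k) sub = -1 := by omega
        rw [hrw] at h1 h
        omega
      rw [hrw]
      omega
    omega

theorem pvTake_eq_iff_prefix (l sub : List Char) :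
    ((l.take sub.length = sub) ↔ sub <+: l) := by
  rw [List.prefix_iff_eq_take]
  exact ⟨fun h => h.symm, fun h => h.symm⟩

theorem pvBLoop_fuel (t q0 q1 : List Char) (hq : q0 ≠ [] ∨ q1 ≠ []) :
    ∀ f1 f2 inside i start acc, i ≤ t.length →
      pvBM t.length q1 inside i ≤ f1 → pvBM t.length q1 inside i ≤ f2 →
      pvBLoop t q0 q1 inside i start acc f1 = pvBLoop t q0 q1 inside i start acc f2 := by
  intro f1
  induction f1 using Nat.strong_induction_on with
  | _ f1 ih =>
    intro f2 inside i start acc hi h1 h2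
    have hm1 : 1 ≤ pvBM t.length q1 inside i := by unfold pvBM; split <;> split <;> omega
    match f1, f2 with
    | 0, _ => omega
    | _ + 1, 0 => omega
    | fa + 1, fb + 1 =>
      by_cases hlt : i < t.length
      · by_cases hins : inside = false
        · subst hins
          by_cases hmatch : (t.drop i).take q0.length = q0
          · have hfit : i + q0.length ≤ t.length := by
              have := ((pvTake_eq_iff_prefix _ _).mp hmatch).length_le
              simp [List.length_drop] at this; omega
            have hq0 : q1 = [] → 1 ≤ q0.length := by
              intro hq1
              rcases hq with h | h
              · exact List.length_pos_of_ne_nil h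
              · exact absurd hq1 h
            have hdec : pvBM t.length q1 true (i + q0.length) + 1 ≤ pvBM t.length q1 false i := by
              unfold pvBM
              by_cases hq1 : q1 = []
              · have := hq0 hq1; simp [hq1]; omega
              · simp [hq1]; omega
            simp only [pvBLoop, if_pos hlt, if_pos hmatch]
            exact ih fa (by omega) fb _ _ _ _ hfit (by omega) (by omega)
          · have hdec : pvBM t.length q1 false (i + 1) + 1 ≤ pvBM t.length q1 false i := by
              unfold pvBM; split <;> omega
            simp only [pvBLoop, if_pos hlt, if_neg hmatch]
            exact ih fa (by omega) fb _ _ _ _ (by omega) (by omega) (by omega)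
        · have hins' : inside = true := by revert hins; cases inside <;> simp
          subst hins'
          by_cases hmatch : (t.drop i).take q1.length = q1
          · have hfit : i + q1.length ≤ t.length := by
              have := ((pvTake_eq_iff_prefix _ _).mp hmatch).length_le
              simp [List.length_drop] at this; omega
            have hdec : pvBM t.length q1 false (i + q1.length) + 1 ≤ pvBM t.length q1 true i := by
              unfold pvBM
              by_cases hq1 : q1 = []
              · simp [hq1]
              · have := List.length_pos_of_ne_nil hq1
                simp [hq1]; omega
            simp only [pvBLoop, if_pos hlt]
            simp only [show (true = false) = False from by simp, if_false]
            rw [if_pos hmatch, if_pos hmatch]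
            exact ih fa (by omega) fb _ _ _ _ hfit (by omega) (by omega)
          · have hdec : pvBM t.length q1 true (i + 1) + 1 ≤ pvBM t.length q1 true i := by
              unfold pvBM; split <;> omega
            simp only [pvBLoop, if_pos hlt]
            simp only [show (true = false) = False from by simp, if_false]
            rw [if_neg hmatch, if_neg hmatch]
            exact ih fa (by omega) fb _ _ _ _ (by omega) (by omega) (by omega)
      · simp only [pvBLoop, if_neg hlt]

theorem pvBM_pos (n : Nat) (q1 : List Char) (inside : Bool) (i : Nat) :
    1 ≤ pvBM n q1 inside i := by
  unfold pvBM; split <;> split <;> omega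

theorem pvBLoop_succ (t q0 q1 : List Char) (inside : Bool) (i start : Nat)
    (acc : List (Int × Int)) (f : Nat) :
    pvBLoop t q0 q1 inside i start acc (f + 1) =
      (if i < t.length then
        if inside = false then
          if (t.drop i).take q0.length = q0 then
            pvBLoop t q0 q1 true (i + q0.length) start
              (if start ≠ i then acc ++ [((start : Int), (i : Int))] else acc) f
          else pvBLoop t q0 q1 false (i + 1) start acc f
        else
          if (t.drop i).take q1.length = q1 then
            pvBLoop t q0 q1 false (i + q1.length) (i + q1.length) acc f
          else pvBLoop t q0 q1 true (i + 1) start acc f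
      else
        if inside = false ∧ start ≠ t.length then acc ++ [((start : Int), (t.length : Int))]
        else acc) := rfl

theorem pvCast_if_pair (start i : Nat) (acc : List (Int × Int)) :
    (if (start : Int) ≠ (i : Int) then acc ++ [((start : Int), (i : Int))] else acc)
      = (if start ≠ i then acc ++ [((start : Int), (i : Int))] else acc) := by
  by_cases hx : start = i
  · subst hx; simp
  · rw [if_pos hx, if_pos (by exact_mod_cast hx)]

theorem pvBLoop_out (t q0 q1 : List Char) (hq : q0 ≠ [] ∨ q1 ≠ []) :
    ∀ f i start acc, i ≤ t.length → pvBM t.length q1 false i ≤ f →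
      pvBLoop t q0 q1 false i start acc f =
        (if PySem.Chars.findFrom t q0 (i : Int) = -1 then
           (if start ≠ t.length then acc ++ [((start : Int), (t.length : Int))] else acc)
         else
           pvBLoop t q0 q1 true ((PySem.Chars.findFrom t q0 (i : Int)).toNat + q0.length) start
             (if (start : Int) ≠ PySem.Chars.findFrom t q0 (i : Int) then
                acc ++ [((start : Int), PySem.Chars.findFrom t q0 (i : Int))] else acc) f) := by
  intro f
  induction f using Nat.strong_induction_on with
  | _ f ih =>
    intro i start acc hi hf
    have hm1 := pvBM_pos t.length q1 false i
    match f with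
    | 0 => omega
    | fa + 1 =>
      rw [pvBLoop_succ]
      by_cases hlt : i < t.length
      · rw [if_pos hlt, if_pos rfl]
        by_cases hmatch : (t.drop i).take q0.length = q0
        · -- match at i: findFrom = i
          have hpre := (pvTake_eq_iff_prefix _ _).mp hmatch
          have hself := pvFindFrom_self t q0 i hi hpre
          have hfit : i + q0.length ≤ t.length := by
            have := hpre.length_le; simp [List.length_drop] at this; omega
          rw [if_pos hmatch, hself, if_neg (show ¬((i:Int) = -1) from by omega),
            Int.toNat_natCast, pvCast_if_pair]
          have hq0 : q1 = [] → 1 ≤ q0.length := by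
            intro hq1
            rcases hq with h | h
            · exact List.length_pos_of_ne_nil h
            · exact absurd hq1 h
          have hdec : pvBM t.length q1 true (i + q0.length) + 1 ≤ pvBM t.length q1 false i := by
            unfold pvBM
            by_cases hq1 : q1 = []
            · have := hq0 hq1; simp [hq1]; omega
            · simp [hq1]; omega
          exact pvBLoop_fuel t q0 q1 hq fa (fa+1) true _ start _ hfit (by omega) (by omega)
        · -- no match at i
          have hnpre : ¬ q0 <+: t.drop i := fun hc => hmatch ((pvTake_eq_iff_prefix _ _).mpr hc)
          have hsucc := pvFindFrom_succ t q0 i hlt hnpre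
          have hdec : pvBM t.length q1 false (i + 1) + 1 ≤ pvBM t.length q1 false i := by
            unfold pvBM; split <;> omega
          rw [if_neg hmatch, ih fa (by omega) (i+1) start acc (by omega) (by omega), ← hsucc]
          by_cases he : PySem.Chars.findFrom t q0 (i : Int) = -1
          · rw [if_pos he, if_pos he]
          · rw [if_neg he, if_neg he]
            obtain ⟨hge, hfit2⟩ := pvFind_fit t q0 (i+1) hlt (by rw [← hsucc]; exact he)
            rw [← hsucc] at hge hfit2
            have hdec2 : pvBM t.length q1 true ((PySem.Chars.findFrom t q0 (i:Int)).toNat + q0.length) + 1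
                ≤ pvBM t.length q1 false i := by
              by_cases hq1 : q1 = [] <;> simp only [pvBM, hq1] <;> simp <;> omega
            exact pvBLoop_fuel t q0 q1 hq fa (fa+1) true _ start _ (by omega) (by omega) (by omega)
      · -- i = n
        have hin : i = t.length := by omega
        subst hin
        rw [if_neg hlt]
        by_cases hq0 : q0 = []
        · subst hq0
          have hself := pvFindFrom_self t [] t.length le_rfl (by simp)
          rw [hself, if_neg (show ¬(((t.length:Nat):Int) = -1) from by omega),
            Int.toNat_natCast, pvCast_if_pair, pvBLoop_succ]
          rw [List.length_nil, Nat.add_zero, if_neg hlt]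
          by_cases hcond : start ≠ t.length
          · rw [if_pos (show (false = false) ∧ start ≠ t.length from ⟨rfl, hcond⟩),
                if_neg (show ¬((true = false) ∧ start ≠ t.length) from by simp),
                if_pos hcond]
          · rw [if_neg (show ¬((false = false) ∧ start ≠ t.length) from by simp_all),
                if_neg (show ¬((true = false) ∧ start ≠ t.length) from by simp),
                if_neg hcond]
        · have hne : PySem.Chars.findFrom t q0 ((t.length : Nat) : Int) = -1 := by
            rw [PySem.Chars.findFrom_natCast_eq_neg_one_iff t q0 t.length le_rfl]
            simp only [List.drop_length]
            rw [List.infix_nil]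
            exact hq0
          rw [if_pos hne]
          by_cases hcond : start ≠ t.length
          · rw [if_pos (show (false = false) ∧ start ≠ t.length from ⟨rfl, hcond⟩), if_pos hcond]
          · rw [if_neg (show ¬((false = false) ∧ start ≠ t.length) from by simp_all), if_neg hcond]

theorem pvBLoop_in (t q0 q1 : List Char) (hq : q0 ≠ [] ∨ q1 ≠ []) :
    ∀ f i start acc, i ≤ t.length → pvBM t.length q1 true i ≤ f →
      pvBLoop t q0 q1 true i start acc f =
        (if PySem.Chars.findFrom t q1 (i : Int) = -1 then acc
         else
           pvBLoop t q0 q1 false ((PySem.Chars.findFrom t q1 (i : Int)).toNat + q1.length)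
             ((PySem.Chars.findFrom t q1 (i : Int)).toNat + q1.length) acc f) := by
  intro f
  induction f using Nat.strong_induction_on with
  | _ f ih =>
    intro i start acc hi hf
    have hm1 := pvBM_pos t.length q1 true i
    match f with
    | 0 => omega
    | fa + 1 =>
      rw [pvBLoop_succ]
      by_cases hlt : i < t.length
      · rw [if_pos hlt, if_neg (show ¬(true = false) from by simp)]
        by_cases hmatch : (t.drop i).take q1.length = q1
        · have hpre := (pvTake_eq_iff_prefix _ _).mp hmatch
          have hself := pvFindFrom_self t q1 i hi hpre
          have hfit : i + q1.length ≤ t.length := by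
            have := hpre.length_le; simp [List.length_drop] at this; omega
          rw [if_pos hmatch, hself, if_neg (show ¬((i:Int) = -1) from by omega),
            Int.toNat_natCast]
          have hdec : pvBM t.length q1 false (i + q1.length) + 1 ≤ pvBM t.length q1 true i := by
            by_cases hq1 : q1 = []
            · simp only [pvBM, hq1]; simp
            · have := List.length_pos_of_ne_nil hq1
              simp only [pvBM, hq1]; simp; omega
          exact pvBLoop_fuel t q0 q1 hq fa (fa+1) false _ _ _ hfit (by omega) (by omega)
        · have hnpre : ¬ q1 <+: t.drop i := fun hc => hmatch ((pvTake_eq_iff_prefix _ _).mpr hc)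
          have hsucc := pvFindFrom_succ t q1 i hlt hnpre
          have hdec : pvBM t.length q1 true (i + 1) + 1 ≤ pvBM t.length q1 true i := by
            unfold pvBM; split <;> omega
          rw [if_neg hmatch, ih fa (by omega) (i+1) start acc (by omega) (by omega), ← hsucc]
          by_cases he : PySem.Chars.findFrom t q1 (i : Int) = -1
          · rw [if_pos he, if_pos he]
          · rw [if_neg he, if_neg he]
            obtain ⟨hge, hfit2⟩ := pvFind_fit t q1 (i+1) hlt (by rw [← hsucc]; exact he)
            rw [← hsucc] at hge hfit2
            have hdec2 : pvBM t.length q1 false ((PySem.Chars.findFrom t q1 (i:Int)).toNat + q1.length) + 1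
                ≤ pvBM t.length q1 true i := by
              by_cases hq1 : q1 = []
              · subst hq1; simp only [pvBM]; simp; omega
              · simp only [pvBM, hq1]; simp; omega
            exact pvBLoop_fuel t q0 q1 hq fa (fa+1) false _ _ _ (by omega) (by omega) (by omega)
      · have hin : i = t.length := by omega
        subst hin
        rw [if_neg hlt, if_neg (show ¬((true = false) ∧ start ≠ t.length) from by simp)]
        by_cases hq1 : q1 = []
        · subst hq1
          have hself := pvFindFrom_self t [] t.length le_rfl (by simp)
          rw [hself, if_neg (show ¬(((t.length:Nat):Int) = -1) from by omega),
            Int.toNat_natCast, pvBLoop_succ]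
          rw [List.length_nil, Nat.add_zero, if_neg hlt,
            if_neg (show ¬((false = false) ∧ t.length ≠ t.length) from by simp)]
        · have hne : PySem.Chars.findFrom t q1 ((t.length : Nat) : Int) = -1 := by
            rw [PySem.Chars.findFrom_natCast_eq_neg_one_iff t q1 t.length le_rfl]
            simp only [List.drop_length]
            rw [List.infix_nil]
            exact hq1
          rw [if_pos hne]

theorem pvALoop_end (t q0 q1 : List Char) (acc : List (Int × Int)) (f : Nat) :
    pvALoop t q0 q1 ((t.length : Nat) : Int) acc f = acc := by
  cases f <;> simp [pvALoop]

theorem pvMain (t q0 q1 : List Char) (hq : q0 ≠ [] ∨ q1 ≠ []) :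
    ∀ fa istart acc fb, istart ≤ t.length → t.length - istart + 1 ≤ fa →
      pvBM t.length q1 false istart ≤ fb →
      pvALoop t q0 q1 (istart : Int) acc fa = pvBLoop t q0 q1 false istart istart acc fb := by
  intro fa
  induction fa using Nat.strong_induction_on with
  | _ fa ih =>
    intro istart acc fb hi hfa hfb
    have hmb := pvBM_pos t.length q1 false istart
    match fa, fb with
    | 0, _ => omega
    | _ + 1, 0 => omega
    | fa + 1, fb + 1 =>
      by_cases hlt : istart < t.length
      · simp only [pvALoop]
        rw [if_pos (show (istart : Int) < ((t.length : Nat) : Int) from by exact_mod_cast hlt)]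
        rw [pvFindFrom_some_len, pvFindFrom_some_len]
        rw [pvBLoop_out t q0 q1 hq (fb+1) istart istart acc hi (by omega)]
        by_cases hE : PySem.Chars.findFrom t q0 (istart : Int) = -1
        · -- q0 not found: one last outside span, then stop
          have hq0ne : q0 ≠ [] := by
            intro hc
            rw [hc, pvFindFrom_self t [] istart hi (by simp)] at hE
            omega
          have hlq0 : 1 ≤ q0.length := List.length_pos_of_ne_nil hq0ne
          rw [if_pos hE, if_pos hE]
          rw [if_pos (show (istart : Int) ≠ ((t.length : Nat) : Int) from by
            intro hc; exact absurd (by exact_mod_cast hc) (by omega : istart ≠ t.length))]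
          rw [pvFindFrom_of_gt t q1 _ (by omega)]
          rw [if_pos rfl, pvALoop_end]
          rw [if_pos (show istart ≠ t.length from by omega)]
        · rw [if_neg hE, if_neg hE]
          obtain ⟨hge, hfit⟩ := pvFind_fit t q0 istart (le_of_lt hlt) hE
          set r := PySem.Chars.findFrom t q0 (istart : Int) with hr
          have hr0 : (0:Int) ≤ r := by
            obtain ⟨h1, _, _⟩ := PySem.Chars.findFrom_natCast_spec t q0 istart (le_of_lt hlt) hE
            omega
          have hrp : r = ((r.toNat : Nat) : Int) := (Int.toNat_of_nonneg hr0).symm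
          set p := r.toNat with hp
          have hcast : r + (q0.length : Int) = ((p + q0.length : Nat) : Int) := by
            omega
          rw [hcast]
          have hlq : 1 ≤ q0.length + q1.length := by
            rcases hq with h | h
            · have := List.length_pos_of_ne_nil h; omega
            · have := List.length_pos_of_ne_nil h; omega
          have hfuel : pvBM t.length q1 true (p + q0.length) ≤ fb + 1 := by
            have h1 : q1 = [] → 1 ≤ q0.length := by
              intro hq1
              rcases hq with h | h
              · exact List.length_pos_of_ne_nil h
              · exact absurd hq1 h
            unfold pvBM at hfb ⊢
            by_cases hq1 : q1 = []
            · have := h1 hq1; simp [hq1] at hfb ⊢; omega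
            · simp [hq1] at hfb ⊢; omega
          rw [pvBLoop_in t q0 q1 hq (fb+1) (p + q0.length) istart _ (by omega) hfuel]
          set r2 := PySem.Chars.findFrom t q1 ((p + q0.length : Nat) : Int) with hr2
          by_cases hE2 : r2 = -1
          · rw [if_pos hE2, if_pos hE2, pvALoop_end]
          · rw [if_neg hE2, if_neg hE2]
            obtain ⟨hge2, hfit2⟩ := pvFind_fit t q1 (p + q0.length) (by omega) hE2
            have hr20 : (0:Int) ≤ r2 := by
              obtain ⟨h1, _, _⟩ :=
                PySem.Chars.findFrom_natCast_spec t q1 (p + q0.length) (by omega) hE2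
              rw [hr2]; omega
            have hcast2 : r2 + (q1.length : Int) = ((r2.toNat + q1.length : Nat) : Int) := by
              omega
            rw [hcast2]
            refine ih fa (by omega) (r2.toNat + q1.length) _ (fb+1) (by omega) (by omega) ?_
            unfold pvBM at hfb ⊢
            omega
      · -- istart = t.length : both loops stop
        have hieq : istart = t.length := by omega
        subst hieq
        rw [pvALoop_end, pvBLoop_succ, if_neg hlt,
          if_neg (show ¬((false = false) ∧ t.length ≠ t.length) from by simp)]

theorem pvBLoop_end (t q0 q1 : List Char) (acc : List (Int × Int)) (f : Nat) :
    pvBLoop t q0 q1 false t.length t.length acc f = acc := by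
  cases f <;> simp [pvBLoop]

-- ===== VERDICT (by name: the statement is the Claim_ definition above) =====
theorem get_index_no_quot_spec : Claim_equal_get_index_no_quot := by
  intro text quot0 quot1 _hdom hpre
  unfold Spec_get_index_no_quot get_index_no_quot get_index_no_quot_alt
  by_cases hq : quot0.toList ≠ [] ∨ quot1.toList ≠ []
  · have h := pvMain text.toList quot0.toList quot1.toList hq (text.toList.length + 2) 0 []
      (3 * text.toList.length + 3) (Nat.zero_le _) (by omega)
      (by unfold pvBM; split <;> split <;> omega)
    simpa using h
  · push Not at hq
    obtain ⟨h0, h1⟩ := hq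
    unfold Pre_get_index_no_quot at hpre
    push Not at hpre
    have htx : text = "" := hpre (by cases quot0; simpa using h0) (by cases quot1; simpa using h1)
    have hlen : text.toList = [] := by rw [htx]; rfl
    have hA := pvALoop_end text.toList quot0.toList quot1.toList [] (text.toList.length + 2)
    have hB := pvBLoop_end text.toList quot0.toList quot1.toList [] (3 * text.toList.length + 3)
    rw [hlen] at hA hB ⊢
    simpa using hA.trans hB.symm
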